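-- pv_equiv track=rewrite | github.com/divsriv111/Practice-Programs | python/practice/PRETTYPRINT.py | printPattern
-- ===== SOURCE A (Python) =====
-- def printPattern(A):
--     s = 2 * A - 1
--     a = []
--     for i in range(0, int(s / 2) + 1):
--         m = A
--         temp = []
--         # Decreasing part
--         for j in range(0, i):
--             temp.append(m)
--             m -= 1
--
--         # Conatsant Part
--         for k in range(0, s - 2 * i):
--             temp.append(A-i)
--
--             # Increasing part.
--         m = A - i + 1
--         for l in range(0, i):
--             temp.append(m)
--             m += 1
--         a.append(temp)
--
--         # Lower Half
--     for i in range(int(s / 2), -1, -1):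
--         temp = []
--         # Decreasing Part
--         m = A
--         for j in range(0, i):
--             temp.append(m)
--             m -= 1
--
--         # Constant Part.
--         for k in range(0, s - 2 * i):
--             temp.append(A-i)
--
--             # Decreasing Part
--         m = A - i + 1
--         for l in range(0, i):
--             temp.append(m)
--             m += 1
--         a.append(temp)
--     a.pop(A)
--     return a
-- ===== SOURCE B (Python) =====
-- def printPattern(A):
--     s = 2 * A - 1
--     c0 = A - 1
--     d = [abs(x - c0) for x in range(s)]
--     return [[1 + max(dr, dc) for dc in d] for dr in d]
-- ===== Notes on version B (the rewrite author's own statement) =====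
-- stated objective: simpler
-- what changed: B replaces A's piecewise row construction (decreasing/constant/increasing sub-loops, a duplicated lower-half pass, and a pop of the duplicated middle row) with the closed form: it precomputes the list of Chebyshev distances from the centre index once and fills the whole grid, in a single nested comprehension, with one plus the larger of the row distance and the column distance.
-- intended difference: On A = 0, A returns [[]] (one empty row, an artefact of its loop bounds running once on the empty range) while B returns the empty pattern [], the intended value for a grid with no rows. — e.g. on printPattern(0): A returns [[]], B returns []
import Mathlib
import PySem

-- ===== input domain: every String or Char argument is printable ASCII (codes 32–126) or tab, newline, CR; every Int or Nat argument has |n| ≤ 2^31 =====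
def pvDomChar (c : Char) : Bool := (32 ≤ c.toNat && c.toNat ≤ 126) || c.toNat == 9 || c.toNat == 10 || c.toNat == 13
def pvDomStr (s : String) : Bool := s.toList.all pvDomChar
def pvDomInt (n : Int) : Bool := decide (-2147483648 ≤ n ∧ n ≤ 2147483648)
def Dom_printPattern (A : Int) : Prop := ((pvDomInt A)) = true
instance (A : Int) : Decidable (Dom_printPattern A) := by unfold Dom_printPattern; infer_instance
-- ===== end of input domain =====

-- B replaces A's piecewise row loops and mirrored second pass by the closed form: each cell
-- is one plus the larger of its row and column distances from the centre (objective: simpler).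

-- ===== PORT A =====
-- One row of A's loops; this block of code appears verbatim in BOTH of A's outer
-- loops (upper half and lower half), so it is transcribed once and used twice:
-- decreasing part, constant part, increasing part, each a fold over its range.
def pvRowA (A s i : Int) : List Int :=
  let d := (PySem.List.pyRange 0 i 1).foldl
    (fun (p : List Int × Int) _ => (p.1 ++ [p.2], p.2 - 1)) (([] : List Int), A)
  let t := (PySem.List.pyRange 0 (s - 2 * i) 1).foldl (fun t _ => t ++ [A - i]) d.1
  let u := (PySem.List.pyRange 0 i 1).foldl
    (fun (p : List Int × Int) _ => (p.1 ++ [p.2], p.2 + 1)) (t, A - i + 1)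
  u.1

def printPattern (A : Int) : List (List Int) :=
  let s := 2 * A - 1
  -- int(s / 2): true division then int() truncates toward zero; Int.tdiv is exact on Dom
  let half := Int.tdiv s 2
  let a := (PySem.List.pyRange 0 (half + 1) 1).foldl (fun a i => a ++ [pvRowA A s i]) []
  let a := (PySem.List.pyRange half (-1) (-1)).foldl (fun a i => a ++ [pvRowA A s i]) a
  match PySem.List.pop? a A with
  | some r => r.2
  | none => []  -- a.pop(A) raises IndexError here (only when A < 0); excluded by Pre_

-- ===== PORT B =====
def printPattern_alt (A : Int) : List (List Int) :=
  let s := 2 * A - 1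
  let c0 := A - 1
  let d := (PySem.List.pyRange 0 s 1).map (fun x => |x - c0|)
  d.map (fun dr => d.map (fun dc => 1 + max dr dc))

-- ===== PRECONDITION & SPEC =====
-- Pre_ excludes exactly A < 0, where A's a.pop(A) raises IndexError on an empty list.
def Pre_printPattern (A : Int) : Prop := 0 ≤ A
instance (A : Int) : Decidable (Pre_printPattern A) := by unfold Pre_printPattern; infer_instance
def pvWitness_printPattern : Int := 3

-- On A = 0 A returns [[]] (one empty row, an artefact of its loop bounds running once on
-- an empty range); B returns the empty pattern [], the intended value for a grid with a
-- negative side length.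
def D_printPattern (A : Int) : Prop := A = 0
instance (A : Int) : Decidable (D_printPattern A) := by unfold D_printPattern; infer_instance
def Spec_printPattern (A : Int) (out : List (List Int)) : Prop := ¬ D_printPattern A → out = printPattern_alt A
instance (A : Int) (out : List (List Int)) : Decidable (Spec_printPattern A out) := by unfold Spec_printPattern; infer_instance
def pvDiffWitness_printPattern : Int := 0
def pvDiffWitnessOut_printPattern : (List (List Int)) × (List (List Int)) := ([[]], [])

-- ===== CLAIM (what is proved, stated in full; the proofs are below) =====
def Claim_unchanged_printPattern : Prop := ∀ (A : Int), Dom_printPattern A → Pre_printPattern A → Spec_printPattern A (printPattern A)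
def Claim_changed_printPattern : Prop := Dom_printPattern (pvDiffWitness_printPattern) ∧ Pre_printPattern (pvDiffWitness_printPattern) ∧ D_printPattern (pvDiffWitness_printPattern) ∧ printPattern (pvDiffWitness_printPattern) = pvDiffWitnessOut_printPattern.1 ∧ printPattern_alt (pvDiffWitness_printPattern) = pvDiffWitnessOut_printPattern.2 ∧ pvDiffWitnessOut_printPattern.1 ≠ pvDiffWitnessOut_printPattern.2
def Claim_exact_printPattern : Prop := ∀ (A : Int), Dom_printPattern A → Pre_printPattern A → D_printPattern A → printPattern A ≠ printPattern_alt A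

-- ===== LEMMAS AND PROOFS =====

-- shifting a range-map by one
lemma pv_range_shift_sub (n : Nat) (m : Int) :
    (List.range (n + 1)).map (fun k : Nat => m - (k : Int))
      = m :: (List.range n).map (fun k : Nat => (m - 1) - (k : Int)) := by
  rw [List.range_succ_eq_map, List.map_cons, List.map_map]
  refine congrArg₂ _ (by omega) (List.map_congr_left ?_)
  intro k _
  simp only [Function.comp_apply, Nat.succ_eq_add_one]
  push_cast
  ring

lemma pv_range_shift_add (n : Nat) (m : Int) :
    (List.range (n + 1)).map (fun k : Nat => m + (k : Int))
      = m :: (List.range n).map (fun k : Nat => (m + 1) + (k : Int)) := by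
  rw [List.range_succ_eq_map, List.map_cons, List.map_map]
  refine congrArg₂ _ (by omega) (List.map_congr_left ?_)
  intro k _
  simp only [Function.comp_apply, Nat.succ_eq_add_one]
  push_cast
  ring

-- the decreasing fold: appends m, m-1, …, m-(n-1)
lemma pv_decFold (L : List Int) : ∀ (l : List Int) (m : Int),
    L.foldl (fun (p : List Int × Int) _ => (p.1 ++ [p.2], p.2 - 1)) (l, m)
      = (l ++ (List.range L.length).map (fun k : Nat => m - (k : Int)), m - L.length) := by
  induction L with
  | nil => intro l m; simp
  | cons x xs ih =>
      intro l m
      rw [List.foldl_cons]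
      show List.foldl _ (l ++ [m], m - 1) xs = _
      rw [ih (l ++ [m]) (m - 1), List.length_cons, pv_range_shift_sub]
      refine Prod.ext ?_ ?_
      · show (l ++ [m]) ++ _ = l ++ (m :: _)
        simp
      · show m - 1 - (xs.length : Int) = m - ((xs.length + 1 : Nat) : Int)
        push_cast; ring

-- the increasing fold: appends m, m+1, …, m+(n-1)
lemma pv_incFold (L : List Int) : ∀ (l : List Int) (m : Int),
    L.foldl (fun (p : List Int × Int) _ => (p.1 ++ [p.2], p.2 + 1)) (l, m)
      = (l ++ (List.range L.length).map (fun k : Nat => m + (k : Int)), m + L.length) := by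
  induction L with
  | nil => intro l m; simp
  | cons x xs ih =>
      intro l m
      rw [List.foldl_cons]
      show List.foldl _ (l ++ [m], m + 1) xs = _
      rw [ih (l ++ [m]) (m + 1), List.length_cons, pv_range_shift_add]
      refine Prod.ext ?_ ?_
      · show (l ++ [m]) ++ _ = l ++ (m :: _)
        simp
      · show m + 1 + (xs.length : Int) = m + ((xs.length + 1 : Nat) : Int)
        push_cast; ring

-- the constant fold: appends n copies of c
lemma pv_constFold (L : List Int) (c : Int) : ∀ (l : List Int),
    L.foldl (fun t _ => t ++ [c]) l = l ++ List.replicate L.length c := by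
  induction L with
  | nil => intro l; simp
  | cons x xs ih =>
      intro l
      rw [List.foldl_cons, ih (l ++ [c])]
      simp [List.replicate_succ]

lemma pv_rowA_eq (A s i : Int) :
    pvRowA A s i = (List.range i.toNat).map (fun k : Nat => A - (k : Int))
      ++ List.replicate (s - 2 * i).toNat (A - i)
      ++ (List.range i.toNat).map (fun k : Nat => A - i + 1 + (k : Int)) := by
  unfold pvRowA
  simp only [pv_decFold, pv_constFold, pv_incFold, List.nil_append,
    PySem.List.length_pyRange_one, Int.sub_zero, List.append_assoc]

lemma pv_eraseIdx_append {α : Type} (l1 l2 : List α) :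
    (l1 ++ l2).eraseIdx l1.length = l1 ++ l2.tail := by
  induction l1 with
  | nil => simp [List.eraseIdx_zero]
  | cons x xs ih => simp [List.eraseIdx_cons_succ, ih]

-- the closed-form row equals A's pieced-together row, for any r at Chebyshev
-- row-distance A-1-i from the centre
lemma pv_rowB_eq_rowA (A i r : Int) (hi0 : 0 ≤ i) (hiA : i ≤ A - 1)
    (habs : |r - (A - 1)| = A - 1 - i) :
    (PySem.List.pyRange 0 (2 * A - 1) 1).map
        (fun c => 1 + max |r - (A - 1)| |c - (A - 1)|)
      = pvRowA A (2 * A - 1) i := by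
  rw [pv_rowA_eq A (2 * A - 1) i]
  rw [PySem.List.pyRange_one_append 0 i (2 * A - 1) (by omega) (by omega),
      PySem.List.pyRange_one_append i (2 * A - 1 - i) (2 * A - 1) (by omega) (by omega)]
  simp only [List.map_append, List.append_assoc]
  congr 1
  · -- decreasing part
    rw [PySem.List.pyRange_one 0 i]
    simp only [Int.sub_zero, List.map_map]
    apply List.map_congr_left
    intro k hk
    simp only [List.mem_range] at hk
    have hk' : (k : Int) < i := by omega
    have h1 : |(0 + (k : Int)) - (A - 1)| = A - 1 - k := by
      rw [abs_of_nonpos (by omega)]; omega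
    simp only [Function.comp_apply, h1, habs]
    omega
  congr 1
  · -- constant part
    have hrep : (2 * A - 1 - 2 * i).toNat = ((2 * A - 1 - i) - i).toNat := by omega
    rw [hrep]
    rw [List.eq_replicate_iff]
    constructor
    · simp [PySem.List.length_pyRange_one]
    · intro b hb
      simp only [List.mem_map] at hb
      obtain ⟨c, hc, rfl⟩ := hb
      rw [PySem.List.mem_pyRange_one] at hc
      have h1 : |c - (A - 1)| ≤ A - 1 - i := abs_le.mpr (by omega)
      rw [habs]
      omega
  · -- increasing part
    rw [PySem.List.pyRange_one (2 * A - 1 - i) (2 * A - 1)]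
    have hlen : ((2 * A - 1) - (2 * A - 1 - i)).toNat = i.toNat := by omega
    rw [hlen]
    simp only [List.map_map]
    apply List.map_congr_left
    intro k hk
    simp only [List.mem_range] at hk
    have hk' : (k : Int) < i := by omega
    have h1 : |((2 * A - 1 - i) + (k : Int)) - (A - 1)| = A - i + (k : Int) := by
      rw [abs_of_nonneg (by omega)]; omega
    simp only [Function.comp_apply, h1, habs]
    omega

lemma pv_main (A : Int) (hA : 1 ≤ A) : printPattern A = printPattern_alt A := by
  unfold printPattern printPattern_alt
  simp only [List.map_map, Function.comp_def]
  have htdiv : Int.tdiv (2 * A - 1) 2 = A - 1 := by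
    rw [Int.tdiv_eq_ediv_of_nonneg (by omega)]; omega
  rw [htdiv]
  have hAm1 : A - 1 + 1 = A := by omega
  rw [hAm1]
  rw [PySem.List.foldl_append_singleton_eq_map]
  rw [PySem.List.pyRange_neg_one_eq_reverse]
  have h01 : (-1 : Int) + 1 = 0 := by omega
  rw [h01, hAm1]
  rw [PySem.List.foldl_append_singleton_eq_map]
  rw [List.nil_append, List.map_reverse]
  set f : Int → List Int := fun i => pvRowA A (2 * A - 1) i with hf
  have hlen1 : ((PySem.List.pyRange 0 A 1).map f).length = A.toNat := by
    simp [PySem.List.length_pyRange_one]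
  have hsplit : PySem.List.pyRange 0 A 1 = PySem.List.pyRange 0 (A - 1) 1 ++ [A - 1] := by
    have h := PySem.List.pyRange_one_succ_right (a := 0) (b := A - 1) (by omega)
    rwa [hAm1] at h
  -- the pop at index A removes the first row of the reversed (lower) half
  set xs := (PySem.List.pyRange 0 A 1).map f ++ ((PySem.List.pyRange 0 A 1).map f).reverse
    with hxs
  have hxslen : A.toNat < xs.length := by
    rw [hxs]; simp only [List.length_append, List.length_reverse, hlen1]; omega
  have hA' : (A : Int) = ((A.toNat : Nat) : Int) := by omega
  have htail : (((PySem.List.pyRange 0 A 1).map f).reverse).tail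
      = ((PySem.List.pyRange 0 (A - 1) 1).map f).reverse := by
    rw [hsplit, List.map_append, List.reverse_append]
    simp
  have hpop : PySem.List.pop? xs A
      = some (xs[A.toNat]'hxslen, (PySem.List.pyRange 0 A 1).map f
          ++ (((PySem.List.pyRange 0 (A - 1) 1).map f).reverse)) := by
    have h2 : xs.eraseIdx A.toNat = (PySem.List.pyRange 0 A 1).map f
        ++ (((PySem.List.pyRange 0 (A - 1) 1).map f).reverse) := by
      rw [hxs, ← hlen1, pv_eraseIdx_append, htail]
    conv_lhs => rw [hA']
    rw [PySem.List.pop?_natCast xs A.toNat hxslen, h2]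
  rw [hpop]
  show (PySem.List.pyRange 0 A 1).map f ++ ((PySem.List.pyRange 0 (A - 1) 1).map f).reverse = _
  -- B's side: split the row range at A, keeping the column range intact
  set g : Int → List Int := fun r =>
    (PySem.List.pyRange 0 (2 * A - 1) 1).map (fun c => 1 + max |r - (A - 1)| |c - (A - 1)|)
    with hg
  have hsplitB : PySem.List.pyRange 0 (2 * A - 1) 1
      = PySem.List.pyRange 0 A 1 ++ PySem.List.pyRange A (2 * A - 1) 1 :=
    PySem.List.pyRange_one_append 0 A (2 * A - 1) (by omega) (by omega)
  have hB : (PySem.List.pyRange 0 (2 * A - 1) 1).map g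
      = (PySem.List.pyRange 0 A 1).map g ++ (PySem.List.pyRange A (2 * A - 1) 1).map g := by
    rw [← List.map_append, ← hsplitB]
  rw [hB]
  congr 1
  · -- upper half rows: row r has i = r
    symm
    apply List.map_congr_left
    intro r hr
    rw [PySem.List.mem_pyRange_one] at hr
    exact pv_rowB_eq_rowA A r r hr.1 (by omega)
      (by rw [abs_of_nonpos (by omega)]; omega)
  · -- lower half rows: row r = A + k has i = A - 2 - k
    symm
    apply List.ext_getElem
    · simp [PySem.List.length_pyRange_one]; omega
    · intro k hk1 hk2
      simp only [List.length_map, PySem.List.length_pyRange_one] at hk1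
      simp only [List.getElem_map, List.getElem_reverse, List.length_map,
        PySem.List.length_pyRange_one]
      rw [PySem.List.getElem_pyRange_one, PySem.List.getElem_pyRange_one]
      have hk' : (k : Int) < A - 1 := by omega
      have hidx : (0 : Int) + (((A - 1 - 0).toNat - 1 - k : Nat) : Int) = A - 2 - (k : Int) := by
        omega
      rw [hidx]
      simp only [hf, hg]
      exact pv_rowB_eq_rowA A (A - 2 - k) (A + k) (by omega) (by omega)
        (by rw [abs_of_nonneg (by omega)]; omega)

-- ===== VERDICT (by name: the statement is the Claim_ definition above) =====
theorem printPattern_spec : Claim_unchanged_printPattern := by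
  intro A _ hpre hnd
  unfold Pre_printPattern at hpre
  unfold D_printPattern at hnd
  exact pv_main A (by omega)

theorem printPattern_changed : Claim_changed_printPattern := by
  unfold Claim_changed_printPattern; decide

theorem printPattern_tight : Claim_exact_printPattern := by
  intro A _ _ hd
  unfold D_printPattern at hd
  subst hd
  decide
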